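-- pv_equiv track=rewrite | github.com/Spectra456/Epam-Practice-2018 | ImageProcessing/blur.py | findBorder
-- ===== SOURCE A (Python) =====
-- def findBorder(defaultDiff, defaultSize, size):
--     while True:
--
--         if (defaultSize == size):
--             border = defaultSize - defaultDiff
--             break
--
--         defaultSize = defaultSize + 2
--         defaultDiff = defaultDiff + 1
--
--     return border
-- ===== SOURCE B (Python) =====
-- def findBorder(defaultDiff, defaultSize, size):
--     return size - defaultDiff - (size - defaultSize) // 2
-- ===== Notes on version B (the rewrite author's own statement) =====
-- stated objective: simpler
-- what changed: Replaces the step-by-2 counting loop with the closed-form formula size - defaultDiff - (size - defaultSize)//2.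
import Mathlib
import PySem

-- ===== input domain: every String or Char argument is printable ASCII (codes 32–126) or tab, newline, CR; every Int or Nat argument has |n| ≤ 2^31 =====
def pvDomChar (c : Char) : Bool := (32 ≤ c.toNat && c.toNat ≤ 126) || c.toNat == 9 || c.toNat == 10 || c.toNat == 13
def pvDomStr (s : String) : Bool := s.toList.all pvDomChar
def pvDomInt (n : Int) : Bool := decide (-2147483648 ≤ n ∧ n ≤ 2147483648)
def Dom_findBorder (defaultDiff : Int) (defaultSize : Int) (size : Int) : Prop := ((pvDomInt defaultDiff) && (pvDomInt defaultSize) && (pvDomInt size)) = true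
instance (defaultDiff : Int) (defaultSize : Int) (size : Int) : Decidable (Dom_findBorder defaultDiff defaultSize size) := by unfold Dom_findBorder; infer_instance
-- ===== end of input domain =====

-- B replaces A's step-by-2 counting loop with a closed-form formula (objective: simpler).


-- ===== PORT A =====
-- A's while-loop, fuel-bounded: inside Pre_ the loop makes (size-defaultSize)/2
-- steps, so fuel (size-defaultSize).toNat + 1 always suffices; outside Pre_ the
-- Python loop never terminates, which Pre_ excludes.
def findBorderLoop (fuel : Nat) (defaultDiff defaultSize size : Int) : Int :=
  match fuel with
  | 0 => defaultSize - defaultDiff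
  | n + 1 =>
    if defaultSize = size then defaultSize - defaultDiff
    else findBorderLoop n (defaultDiff + 1) (defaultSize + 2) size

def findBorder (defaultDiff : Int) (defaultSize : Int) (size : Int) : Int :=
  findBorderLoop ((size - defaultSize).toNat + 1) defaultDiff defaultSize size

-- ===== PORT B =====
def findBorder_alt (defaultDiff : Int) (defaultSize : Int) (size : Int) : Int :=
  size - defaultDiff - PySem.Int.floordiv (size - defaultSize) 2

-- ===== PRECONDITION & SPEC =====
-- Pre_ excludes exactly the inputs on which A's while-loop never terminates:
-- it hits defaultSize == size iff defaultSize ≤ size with matching parity.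
def Pre_findBorder (defaultDiff : Int) (defaultSize : Int) (size : Int) : Prop :=
  defaultSize ≤ size ∧ (size - defaultSize) % 2 = 0
instance (defaultDiff : Int) (defaultSize : Int) (size : Int) : Decidable (Pre_findBorder defaultDiff defaultSize size) := by unfold Pre_findBorder; infer_instance

def pvWitness_findBorder : Int × Int × Int := (3, 5, 11)

def Spec_findBorder (defaultDiff : Int) (defaultSize : Int) (size : Int) (out : Int) : Prop := out = findBorder_alt defaultDiff defaultSize size
instance (defaultDiff : Int) (defaultSize : Int) (size : Int) (out : Int) : Decidable (Spec_findBorder defaultDiff defaultSize size out) := by unfold Spec_findBorder; infer_instance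

-- ===== CLAIM (what is proved, stated in full; the proofs are below) =====
def Claim_equal_findBorder : Prop := ∀ (defaultDiff : Int) (defaultSize : Int) (size : Int), Dom_findBorder defaultDiff defaultSize size → Pre_findBorder defaultDiff defaultSize size → Spec_findBorder defaultDiff defaultSize size (findBorder defaultDiff defaultSize size)

-- ===== LEMMAS AND PROOFS =====
theorem findBorderLoop_eq (fuel : Nat) (dd ds s : Int)
    (h1 : ds ≤ s) (h2 : (s - ds) % 2 = 0) (h3 : (s - ds).toNat < fuel) :
    findBorderLoop fuel dd ds s = s - dd - (s - ds) / 2 := by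
  induction fuel generalizing dd ds with
  | zero => omega
  | succ n ih =>
    unfold findBorderLoop
    by_cases h : ds = s
    · subst h; simp
    · simp [h]
      rw [ih (dd + 1) (ds + 2) (by omega) (by omega) (by omega)]
      omega

-- ===== VERDICT (by name: the statement is the Claim_ definition above) =====
theorem findBorder_spec : Claim_equal_findBorder := by
  intro dd ds s _ hpre
  unfold Spec_findBorder findBorder findBorder_alt
  rw [findBorderLoop_eq _ _ _ _ hpre.1 hpre.2 (by omega),
      PySem.Int.floordiv_eq_ediv_of_pos (by omega)]
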